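-- pv_equiv track=rewrite | github.com/MisterKinn/formulite-landing | nova-ai/hwp_controller.py | _select_best_page_candidate
-- ===== SOURCE A (Python) =====
-- def _select_best_page_candidate(
--     candidates: list[tuple[int, int]], total_hint: int = 0
-- ) -> tuple[int, int]:
--     if not candidates:
--         return (0, 0)
--     valid = [(cur, total) for cur, total in candidates if cur > 0 and total > 0 and cur <= total]
--     if not valid:
--         return (0, 0)
--     if total_hint > 0:
--         hinted = [v for v in valid if v[1] == total_hint]
--         if hinted:
--             return max(hinted, key=lambda x: (x[1], x[0]))
--     # Avoid false positives like section indicator 1/1 by preferring larger totals.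
--     return max(valid, key=lambda x: (x[1], x[0]))
-- ===== SOURCE B (Python) =====
-- def _select_best_page_candidate(
--     candidates: list[tuple[int, int]], total_hint: int = 0
-- ) -> tuple[int, int]:
--     # Sort-based strategy: rank all valid candidates once by swapped key
--     # (total, cur) ascending; the overall answer is the top of the ranking,
--     # and a hint match is found by walking down from the top, stopping early
--     # once totals drop below the hint (the ranking is grouped by total).
--     ranked = sorted((t, c) for c, t in candidates if 0 < c <= t)
--     if not ranked:
--         return (0, 0)
--     pick = ranked[-1]
--     if total_hint > 0:
--         for entry in reversed(ranked):
--             if entry[0] < total_hint: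
--                 break
--             if entry[0] == total_hint:
--                 pick = entry
--                 break
--     return (pick[1], pick[0])
-- ===== Notes on version B (the rewrite author's own statement) =====
-- stated objective: alternative
-- what changed: Replaces A's two filter comprehensions plus two max() passes with a sort-based ranking: valid candidates are swapped to (total, cur) and sorted once; the overall answer is the top of the ranking and a hint match is found by an early-exit walk down from the top, exploiting that the ranking is grouped by total.
import Mathlib
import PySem

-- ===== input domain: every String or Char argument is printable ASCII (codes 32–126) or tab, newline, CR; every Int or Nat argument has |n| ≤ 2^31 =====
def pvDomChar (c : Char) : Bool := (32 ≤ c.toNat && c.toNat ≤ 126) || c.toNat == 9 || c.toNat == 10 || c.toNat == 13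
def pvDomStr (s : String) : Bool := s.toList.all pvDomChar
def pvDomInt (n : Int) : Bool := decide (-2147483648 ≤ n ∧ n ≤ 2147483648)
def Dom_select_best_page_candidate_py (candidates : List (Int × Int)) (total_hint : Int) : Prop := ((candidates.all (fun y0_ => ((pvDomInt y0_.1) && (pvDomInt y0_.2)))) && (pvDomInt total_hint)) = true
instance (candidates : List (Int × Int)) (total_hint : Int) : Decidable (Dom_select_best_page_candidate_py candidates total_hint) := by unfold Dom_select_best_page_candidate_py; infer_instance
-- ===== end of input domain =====

-- B replaces A's filter comprehensions + two max() passes with a sort-based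
-- ranking (one sort of the swapped valid pairs, top element, early-exit walk
-- down for the hint); objective: a genuinely different algorithm of similar cost.

-- ===== PORT A =====
def select_best_page_candidate_py (candidates : List (Int × Int)) (total_hint : Int) : Int × Int :=
  if candidates = [] then (0, 0)
  else
    let valid := candidates.filter (fun p => decide (0 < p.1) && decide (0 < p.2) && decide (p.1 ≤ p.2))
    if valid = [] then (0, 0)
    else
      if 0 < total_hint then
        let hinted := valid.filter (fun v => v.2 == total_hint)
        if hinted ≠ [] then
          (PySem.List.max2? hinted (fun x => x.2) (fun x => x.1)).getD (0, 0)
        else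
          (PySem.List.max2? valid (fun x => x.2) (fun x => x.1)).getD (0, 0)
      else
        (PySem.List.max2? valid (fun x => x.2) (fun x => x.1)).getD (0, 0)

-- ===== PORT B =====
-- the early-exit walk down the ranking ('for entry in reversed(ranked): …')
def pvScan (h : Int) (l : List (Int × Int)) (fallback : Int × Int) : Int × Int :=
  match l with
  | [] => fallback
  | entry :: rest =>
    if entry.1 < h then fallback
    else if entry.1 = h then entry
    else pvScan h rest fallback

def select_best_page_candidate_py_alt (candidates : List (Int × Int)) (total_hint : Int) : Int × Int :=
  let ranked := PySem.List.sorted2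
      ((candidates.filter (fun p => decide (0 < p.1) && decide (p.1 ≤ p.2))).map (fun p => (p.2, p.1)))
      (fun x => x.1) (fun x => x.2)
  if ranked = [] then (0, 0)
  else
    let pick0 := PySem.List.pyGetD ranked (-1) (0, 0)
    let pick := if 0 < total_hint then pvScan total_hint ranked.reverse pick0 else pick0
    (pick.2, pick.1)

-- ===== PRECONDITION & SPEC =====
def Spec_select_best_page_candidate_py (candidates : List (Int × Int)) (total_hint : Int) (out : Int × Int) : Prop := out = select_best_page_candidate_py_alt candidates total_hint
instance (candidates : List (Int × Int)) (total_hint : Int) (out : Int × Int) : Decidable (Spec_select_best_page_candidate_py candidates total_hint out) := by unfold Spec_select_best_page_candidate_py; infer_instance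

-- ===== CLAIM (what is proved, stated in full; the proofs are below) =====
def Claim_equal_select_best_page_candidate_py : Prop := ∀ (candidates : List (Int × Int)) (total_hint : Int), Dom_select_best_page_candidate_py candidates total_hint → Spec_select_best_page_candidate_py candidates total_hint (select_best_page_candidate_py candidates total_hint)

-- ===== LEMMAS AND PROOFS =====

def pvSwap (p : Int × Int) : Int × Int := (p.2, p.1)

-- the step of PySem.List.max2? with keys (x.2, x.1)
def pvG (acc : Option (Int × Int)) (x : Int × Int) : Option (Int × Int) :=
  match acc with
  | none => some x
  | some m =>
      if (decide (m.2 < x.2) || !decide (x.2 < m.2) && decide (m.1 < x.1)) = true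
      then some x else some m

lemma max2?_eq_foldl_pvG (xs : List (Int × Int)) :
    PySem.List.max2? xs (fun x => x.2) (fun x => x.1) = xs.foldl pvG none := by
  unfold PySem.List.max2?
  congr 1
  funext acc x
  cases acc <;> rfl

lemma pvCond_iff (m x : Int × Int) :
    (decide (m.2 < x.2) || !decide (x.2 < m.2) && decide (m.1 < x.1)) = true ↔
      toLex (pvSwap m) < toLex (pvSwap x) := by
  rw [Prod.Lex.lt_iff]
  simp [pvSwap]
  omega

lemma foldl_pvG_spec : ∀ (xs : List (Int × Int)) (b m : Int × Int),
    xs.foldl pvG (some b) = some m →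
      (m = b ∨ m ∈ xs) ∧ toLex (pvSwap b) ≤ toLex (pvSwap m) ∧
        ∀ y ∈ xs, toLex (pvSwap y) ≤ toLex (pvSwap m) := by
  intro xs
  induction xs with
  | nil =>
    intro b m hm
    simp only [List.foldl_nil, Option.some.injEq] at hm
    subst hm
    exact ⟨Or.inl rfl, le_refl _, by simp⟩
  | cons x t ih =>
    intro b m hm
    rw [List.foldl_cons] at hm
    by_cases hc : (decide (b.2 < x.2) || !decide (x.2 < b.2) && decide (b.1 < x.1)) = true
    · have hstep : pvG (some b) x = some x := by simp [pvG, hc]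
      rw [hstep] at hm
      obtain ⟨hmem, hbx, hall⟩ := ih x m hm
      have hblt : toLex (pvSwap b) < toLex (pvSwap x) := (pvCond_iff b x).mp hc
      refine ⟨?_, le_trans (le_of_lt hblt) hbx, ?_⟩
      · rcases hmem with h | h
        · exact Or.inr (by simp [h])
        · exact Or.inr (List.mem_cons_of_mem _ h)
      · intro y hy
        rcases List.mem_cons.mp hy with h | h
        · subst h; exact hbx
        · exact hall y h
    · have hstep : pvG (some b) x = some b := by simp [pvG, hc]
      rw [hstep] at hm
      obtain ⟨hmem, hbb, hall⟩ := ih b m hm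
      have hxb : ¬ toLex (pvSwap b) < toLex (pvSwap x) := fun h => hc ((pvCond_iff b x).mpr h)
      refine ⟨?_, hbb, ?_⟩
      · rcases hmem with h | h
        · exact Or.inl h
        · exact Or.inr (List.mem_cons_of_mem _ h)
      · intro y hy
        rcases List.mem_cons.mp hy with h | h
        · subst h
          exact le_trans (le_of_not_gt (by simpa using hxb)) hbb
        · exact hall y h

lemma foldl_pvG_some : ∀ (xs : List (Int × Int)) (m : Int × Int),
    ∃ r, xs.foldl pvG (some m) = some r := by
  intro xs
  induction xs with
  | nil => intro m; exact ⟨m, rfl⟩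
  | cons x t ih =>
    intro m
    simp only [List.foldl_cons, pvG]
    split <;> exact ih _

-- A's max2? over a nonempty list returns a lex-greatest element (key = swapped pair)
lemma max2?_max (v : Int × Int) (t : List (Int × Int)) :
    ∃ m, PySem.List.max2? (v :: t) (fun x => x.2) (fun x => x.1) = some m ∧
      m ∈ v :: t ∧ ∀ y ∈ v :: t, toLex (pvSwap y) ≤ toLex (pvSwap m) := by
  rw [max2?_eq_foldl_pvG, List.foldl_cons]
  have hstep : pvG none v = some v := rfl
  rw [hstep]
  obtain ⟨m, hm⟩ := foldl_pvG_some t v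
  obtain ⟨hmem, hvm, hall⟩ := foldl_pvG_spec t v m hm
  refine ⟨m, hm, ?_, ?_⟩
  · rcases hmem with h | h
    · simp [h]
    · exact List.mem_cons_of_mem _ h
  · intro y hy
    rcases List.mem_cons.mp hy with h | h
    · subst h; exact hvm
    · exact hall y h

-- B's sorted2 over swapped Int pairs is Python's tuple sort = sorted with the lex key
lemma sorted2_eq_sorted_toLex (xs : List (Int × Int)) :
    PySem.List.sorted2 xs (fun x => x.1) (fun x => x.2) =
      PySem.List.sorted xs (fun x => toLex x) := by
  rw [PySem.List.sorted_eq_foldl_insertBy]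
  unfold PySem.List.sorted2
  simp only [if_neg (by simp : ¬ (false = true))]
  have hbef : (fun (a b : Int × Int) => decide (a.1 < b.1) || !decide (b.1 < a.1) && decide (a.2 < b.2))
      = fun (a b : Int × Int) => decide (toLex a < toLex b) := by
    funext a b
    have hiff := pvCond_iff (a.2, a.1) (b.2, b.1)
    simp only [pvSwap, Prod.mk.eta] at hiff
    by_cases h : toLex a < toLex b
    · simp only [decide_eq_true h]
      exact hiff.mpr h
    · simp only [decide_eq_false h]
      exact Bool.eq_false_iff.mpr (fun htrue => h (hiff.mp htrue))
  rw [hbef]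

-- the last element of the ranking is a lex maximum
lemma getLast_max {l : List (Int × Int)} (hpw : l.Pairwise (fun a b => toLex a ≤ toLex b))
    (hne : l ≠ []) : ∀ y ∈ l, toLex y ≤ toLex (l.getLast hne) := by
  intro y hy
  obtain ⟨i, hi, rfl⟩ := List.getElem_of_mem hy
  rw [List.getLast_eq_getElem]
  rcases Nat.lt_or_ge i (l.length - 1) with h | h
  · exact (List.pairwise_iff_getElem.mp hpw) i (l.length - 1) hi (by omega) h
  · have : i = l.length - 1 := by omega
    subst this
    exact le_refl _

-- the early-exit walk when no entry matches the hint
lemma pvScan_not_found : ∀ (l : List (Int × Int)) (h : Int) (fb : Int × Int),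
    (∀ x ∈ l, x.1 ≠ h) → pvScan h l fb = fb := by
  intro l
  induction l with
  | nil => intro h fb _; rfl
  | cons e rest ih =>
    intro h fb hno
    unfold pvScan
    by_cases h1 : e.1 < h
    · simp [h1]
    · have h2 : e.1 ≠ h := hno e (by simp)
      simp only [if_neg h1, if_neg h2]
      exact ih h fb (fun x hx => hno x (List.mem_cons_of_mem _ hx))

-- the early-exit walk on a descending ranking finds the lex-greatest matching entry
lemma pvScan_found : ∀ (l : List (Int × Int)) (h : Int) (fb : Int × Int),
    l.Pairwise (fun a b => toLex b ≤ toLex a) →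
    (∃ x ∈ l, x.1 = h) →
    pvScan h l fb ∈ l ∧ (pvScan h l fb).1 = h ∧
      ∀ y ∈ l, y.1 = h → toLex y ≤ toLex (pvScan h l fb) := by
  intro l
  induction l with
  | nil => intro h fb _ hex; simp at hex
  | cons e rest ih =>
    intro h fb hpw hex
    have hdesc : ∀ y ∈ rest, toLex y ≤ toLex e := fun y hy => (List.pairwise_cons.mp hpw).1 y hy
    have hpwr : rest.Pairwise (fun a b => toLex b ≤ toLex a) := (List.pairwise_cons.mp hpw).2
    unfold pvScan
    by_cases h1 : e.1 < h
    · exfalso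
      obtain ⟨x, hx, hxh⟩ := hex
      rcases List.mem_cons.mp hx with rfl | hx
      · omega
      · have := hdesc x hx
        rw [Prod.Lex.le_iff] at this
        simp at this
        omega
    · by_cases h2 : e.1 = h
      · simp only [if_neg h1, if_pos h2]
        exact ⟨by simp, h2, fun y hy _ => by
          rcases List.mem_cons.mp hy with rfl | hy
          · exact le_refl _
          · exact hdesc y hy⟩
      · simp only [if_neg h1, if_neg h2]
        have hex' : ∃ x ∈ rest, x.1 = h := by
          obtain ⟨x, hx, hxh⟩ := hex
          rcases List.mem_cons.mp hx with rfl | hx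
          · exact absurd hxh h2
          · exact ⟨x, hx, hxh⟩
        obtain ⟨hmem, hfst, hmax⟩ := ih h fb hpwr hex'
        exact ⟨List.mem_cons_of_mem _ hmem, hfst, fun y hy hyh => by
          rcases List.mem_cons.mp hy with rfl | hy
          · exact absurd hyh h2
          · exact hmax y hy hyh⟩

lemma toLex_swap_antisymm {a b : Int × Int}
    (h1 : toLex (pvSwap a) ≤ toLex (pvSwap b)) (h2 : toLex (pvSwap b) ≤ toLex (pvSwap a)) :
    a = b := by
  have := toLex_inj.mp (le_antisymm h1 h2)
  simp only [pvSwap, Prod.mk.injEq] at this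
  exact Prod.ext this.2 this.1

-- the two validity filters select the same candidates
lemma filter_valid_eq (cs : List (Int × Int)) :
    cs.filter (fun p => decide (0 < p.1) && decide (0 < p.2) && decide (p.1 ≤ p.2)) =
      cs.filter (fun p => decide (0 < p.1) && decide (p.1 ≤ p.2)) := by
  apply List.filter_congr
  intro p _
  by_cases h1 : 0 < p.1 <;> by_cases h2 : 0 < p.2 <;> by_cases h3 : p.1 ≤ p.2 <;>
    simp [h1, h2, h3] <;> omega

-- ===== VERDICT (by name: the statement is the Claim_ definition above) =====
theorem select_best_page_candidate_py_spec : Claim_equal_select_best_page_candidate_py := by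
  unfold Claim_equal_select_best_page_candidate_py
  intro cs h _
  unfold Spec_select_best_page_candidate_py
  unfold select_best_page_candidate_py select_best_page_candidate_py_alt
  rw [← filter_valid_eq, sorted2_eq_sorted_toLex]
  set V := cs.filter (fun p => decide (0 < p.1) && decide (0 < p.2) && decide (p.1 ≤ p.2)) with hV
  set R := PySem.List.sorted (V.map (fun p => (p.2, p.1))) (fun x => toLex x) with hRdef
  have hperm : R.Perm (V.map (fun p => (p.2, p.1))) := PySem.List.sorted_perm _ _ _
  have hpw : R.Pairwise (fun a b => toLex a ≤ toLex b) := PySem.List.sorted_pairwise _ _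
  by_cases hVnil : V = []
  · have hRnil : R = [] := by
      have := hperm
      rw [hVnil] at this
      simpa using this.eq_nil
    by_cases hcs : cs = [] <;> simp [hcs, hVnil, hRnil]
  · have hRne : R ≠ [] := by
      intro hR
      rw [hR] at hperm
      exact hVnil (by simpa using (List.map_eq_nil_iff.mp hperm.symm.eq_nil))
    have hcs : cs ≠ [] := by
      intro hc
      rw [hc] at hV
      exact hVnil hV
    -- membership transfer between the ranking and the valid list
    have hmemR : ∀ x, x ∈ R ↔ ∃ u ∈ V, (u.2, u.1) = x := by
      intro x
      rw [hperm.mem_iff, List.mem_map]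
    -- the overall pick: last of the ranking = A's overall max (swapped)
    obtain ⟨v, tV, hVc⟩ := List.exists_cons_of_ne_nil hVnil
    obtain ⟨m, hm, hmmem, hmmax⟩ := max2?_max v tV
    rw [← hVc] at hm hmmem hmmax
    have hL := PySem.List.pyGetD_neg_one R (0, 0) hRne
    have hLmem : R.getLast hRne ∈ R := List.getLast_mem hRne
    obtain ⟨u, huV, huL⟩ := (hmemR _).mp hLmem
    have hoverall : m = ((R.getLast hRne).2, (R.getLast hRne).1) := by
      have h1 : toLex (pvSwap u) ≤ toLex (pvSwap m) := hmmax u huV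
      have h2 : toLex (pvSwap m) ≤ toLex (R.getLast hRne) := by
        apply getLast_max hpw hRne
        exact (hmemR _).mpr ⟨m, hmmem, rfl⟩
      rw [show toLex (pvSwap u) = toLex (R.getLast hRne) by rw [show pvSwap u = R.getLast hRne from huL]] at h1
      have := toLex_swap_antisymm (a := m) (b := (pvSwap (R.getLast hRne))) (by simpa [pvSwap] using h2) (by simpa [pvSwap] using h1)
      simpa [pvSwap] using this
    by_cases hh : 0 < h
    · -- hinted branch
      simp only [hcs, if_false, hVnil, if_false, hh, if_true, hRne]
      by_cases hhint : V.filter (fun v => v.2 == h) = []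
      · -- no hint match: A falls back to the overall max, B's walk falls through
        have hnone : ∀ x ∈ R.reverse, x.1 ≠ h := by
          intro x hx hxh
          obtain ⟨u', hu'V, hu'x⟩ := (hmemR x).mp (List.mem_reverse.mp hx)
          have : u' ∈ V.filter (fun v => v.2 == h) := by
            rw [List.mem_filter]
            exact ⟨hu'V, by simp [show u'.2 = h by rw [← hxh, ← hu'x]]⟩
          rw [hhint] at this
          simp at this
        rw [pvScan_not_found _ _ _ hnone]
        simp only [hhint, ne_eq, not_true_eq_false, if_false]
        rw [hm, hL]
        simp [hoverall]
      · -- hint match exists: A's hinted max = B's walk result (swapped)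
        obtain ⟨hv, thv, hHc⟩ := List.exists_cons_of_ne_nil hhint
        obtain ⟨mh, hmh, hmhmem, hmhmax⟩ := max2?_max hv thv
        rw [← hHc] at hmh hmhmem hmhmax
        have hpwrev : R.reverse.Pairwise (fun a b => toLex b ≤ toLex a) := by
          rw [List.pairwise_reverse]
          exact hpw
        have hmhV : mh ∈ V := (List.mem_filter.mp hmhmem).1
        have hmhh : mh.2 = h := by
          have := (List.mem_filter.mp hmhmem).2
          simpa using this
        have hex : ∃ x ∈ R.reverse, x.1 = h := by
          refine ⟨(mh.2, mh.1), ?_, hmhh⟩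
          rw [List.mem_reverse]
          exact (hmemR _).mpr ⟨mh, hmhV, rfl⟩
        obtain ⟨hrmem, hrfst, hrmax⟩ := pvScan_found R.reverse h (PySem.List.pyGetD R (-1) (0, 0)) hpwrev hex
        set r := pvScan h R.reverse (PySem.List.pyGetD R (-1) (0, 0)) with hr
        obtain ⟨ur, hurV, hurr⟩ := (hmemR r).mp (List.mem_reverse.mp hrmem)
        have hurh : ur.2 = h := by
          have : r.1 = h := hrfst
          rw [← hurr] at this
          exact this
        have hurH : ur ∈ V.filter (fun v => v.2 == h) := by
          rw [List.mem_filter]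
          exact ⟨hurV, by simp [hurh]⟩
        have heq : mh = (r.2, r.1) := by
          have h1 : toLex (pvSwap ur) ≤ toLex (pvSwap mh) := hmhmax ur hurH
          have h2 : toLex (pvSwap mh) ≤ toLex r := by
            have : (mh.2, mh.1) ∈ R.reverse := by
              rw [List.mem_reverse]
              exact (hmemR _).mpr ⟨mh, hmhV, rfl⟩
            exact hrmax _ this hmhh
          rw [show toLex (pvSwap ur) = toLex r by rw [show pvSwap ur = r from hurr]] at h1
          have := toLex_swap_antisymm (a := mh) (b := pvSwap r) (by simpa [pvSwap] using h2) (by simpa [pvSwap] using h1)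
          simpa [pvSwap] using this
        simp only [hhint, ne_eq, not_false_iff, if_true]
        rw [hmh]
        simp [heq]
    · -- no usable hint: overall max on both sides
      simp only [hcs, if_false, hVnil, if_false, hh, if_false, hRne]
      rw [hm, hL]
      simp [hoverall]
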